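-- pv_equiv track=rewrite | github.com/Xen312/latex_app | backend/main.py | parse_latex_errors
-- ===== SOURCE A (Python) =====
-- def parse_latex_errors(stdout: str) -> list:
--     errors = []
--     lines = stdout.split('\n')
--     i = 0
--     while i < len(lines):
--         line = lines[i].strip()
--         if line.startswith('!'):
--             message = line[1:].strip()
--             error_line = None
--             context = ""
--             for j in range(i + 1, min(i + 15, len(lines))):
--                 next_line = lines[j].strip()
--                 if next_line.startswith('l.'):
--                     parts = next_line.split(' ', 1)
--                     error_line = parts[0][2:]
--                     context = parts[1].strip() if len(parts) > 1 else ""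
--                     break
--             errors.append({
--                 "message": message,
--                 "line": error_line,
--                 "context": context
--             })
--         i += 1
--     return errors
-- ===== SOURCE B (Python) =====
-- def parse_latex_errors(stdout: str) -> list:
--     # One backward pass: maintain the nearest following 'l.' line instead of
--     # re-scanning a 15-line window for every '!' line.
--     lines = stdout.split('\n')
--     errors = []
--     next_l = None  # (index, error_line, context) of the nearest 'l.' line below
--     for i in range(len(lines) - 1, -1, -1):
--         s = lines[i].strip()
--         if s.startswith('l.'):
--             parts = s.split(' ', 1)
--             next_l = (i, parts[0][2:], parts[1].strip() if len(parts) > 1 else "")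
--         elif s.startswith('!'):
--             if next_l is not None and next_l[0] < i + 15:
--                 line_no, context = next_l[1], next_l[2]
--             else:
--                 line_no, context = None, ""
--             errors.append({"message": s[1:].strip(), "line": line_no, "context": context})
--     errors.reverse()
--     return errors
-- ===== Notes on version B (the rewrite author's own statement) =====
-- stated objective: alternative
-- what changed: Replaces A's per-'!'-line bounded 15-line forward lookahead scan by a single backward pass that carries the nearest following 'l.' line as running state (with a final reverse), checking the 15-line window arithmetically.
import Mathlib
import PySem

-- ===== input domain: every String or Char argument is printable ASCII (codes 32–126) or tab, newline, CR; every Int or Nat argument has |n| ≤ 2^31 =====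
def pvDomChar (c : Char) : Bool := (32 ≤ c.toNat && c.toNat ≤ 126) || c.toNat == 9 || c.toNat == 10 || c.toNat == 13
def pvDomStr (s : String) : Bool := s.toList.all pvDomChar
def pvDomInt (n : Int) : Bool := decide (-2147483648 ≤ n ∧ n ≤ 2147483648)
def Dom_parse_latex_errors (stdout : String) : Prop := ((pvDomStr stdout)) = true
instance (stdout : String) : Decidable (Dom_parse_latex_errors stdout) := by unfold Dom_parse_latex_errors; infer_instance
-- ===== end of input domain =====

-- B replaces A's bounded 15-line lookahead scan per '!' line by a single backward
-- pass that carries the nearest following 'l.' line (objective: alternative, one pass).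

-- ===== PORT A =====
-- inner 'for j in range(i+1, min(i+15, len(lines)))' loop with break
-- (lines.getD j "" is lines[j]; j is always in range here, so the default is never used)
def pvAFind (lines : List String) (js : List Nat) : Option String × String :=
  match js with
  | [] => (none, "")
  | j :: rest =>
    let next_line := PySem.Str.strip (lines.getD j "")
    if PySem.Str.startswith next_line "l." then
      let parts := (PySem.Str.splitMax? next_line " " 1).getD []   -- sep " " ≠ "": always some
      (some (PySem.Str.slice (parts.getD 0 "") (some 2) none),
       if parts.length > 1 then PySem.Str.strip (parts.getD 1 "") else "")
    else pvAFind lines rest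

-- the outer 'while i < len(lines)' loop (i increases by 1 each turn = scan of the indices)
def pvALoop (lines : List String) (is : List Nat)
    (errors : List (List (String × Option String))) : List (List (String × Option String)) :=
  match is with
  | [] => errors
  | i :: rest =>
    let line := PySem.Str.strip (lines.getD i "")
    let errors' :=
      if PySem.Str.startswith line "!" then
        let message := PySem.Str.strip (PySem.Str.slice line (some 1) none)
        let lc := pvAFind lines (List.range' (i + 1) (min (i + 15) lines.length - (i + 1)))
        errors ++ [[("message", some message), ("line", lc.1), ("context", some lc.2)]]
      else errors
    pvALoop lines rest errors'

def parse_latex_errors (stdout : String) : List (List (String × Option String)) :=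
  let lines := (PySem.Str.split? stdout "\n").getD []   -- sep "\n" ≠ "": always some
  pvALoop lines (List.range lines.length) []

-- ===== PORT B =====
-- 'for i in range(len(lines)-1, -1, -1)' carrying next_l = (index, error_line, context)
def pvBLoop (lines : List String) (is : List Nat) (nextL : Option (Nat × String × String))
    (errors : List (List (String × Option String))) : List (List (String × Option String)) :=
  match is with
  | [] => errors
  | i :: rest =>
    let s := PySem.Str.strip (lines.getD i "")
    if PySem.Str.startswith s "l." then
      let parts := (PySem.Str.splitMax? s " " 1).getD []   -- sep " " ≠ "": always some
      pvBLoop lines rest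
        (some (i, PySem.Str.slice (parts.getD 0 "") (some 2) none,
          if parts.length > 1 then PySem.Str.strip (parts.getD 1 "") else "")) errors
    else if PySem.Str.startswith s "!" then
      let lc : Option String × String :=
        match nextL with
        | some (j, l, c) => if j < i + 15 then (some l, c) else (none, "")
        | none => (none, "")
      pvBLoop lines rest nextL
        (errors ++ [[("message", some (PySem.Str.strip (PySem.Str.slice s (some 1) none))),
                     ("line", lc.1), ("context", some lc.2)]])
    else pvBLoop lines rest nextL errors

def parse_latex_errors_alt (stdout : String) : List (List (String × Option String)) :=
  let lines := (PySem.Str.split? stdout "\n").getD []   -- sep "\n" ≠ "": always some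
  (pvBLoop lines (List.range lines.length).reverse none []).reverse

-- ===== PRECONDITION & SPEC =====
def Spec_parse_latex_errors (stdout : String) (out : List (List (String × Option String))) : Prop := out = parse_latex_errors_alt stdout
instance (stdout : String) (out : List (List (String × Option String))) : Decidable (Spec_parse_latex_errors stdout out) := by unfold Spec_parse_latex_errors; infer_instance

-- ===== CLAIM (what is proved, stated in full; the proofs are below) =====
def Claim_equal_parse_latex_errors : Prop := ∀ (stdout : String), Dom_parse_latex_errors stdout → Spec_parse_latex_errors stdout (parse_latex_errors stdout)

-- ===== LEMMAS AND PROOFS =====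

theorem pvBoolFalse {b : Bool} (h : ¬ b = true) : b = false := by
  cases b
  · rfl
  · exact absurd rfl h

-- the 'l.'-line predicate and the (error_line, context) parse of line j
def pvP (lines : List String) (j : Nat) : Bool :=
  PySem.Str.startswith (PySem.Str.strip (lines.getD j "")) "l."

def pvInfo (lines : List String) (j : Nat) : String × String :=
  let parts := (PySem.Str.splitMax? (PySem.Str.strip (lines.getD j "")) " " 1).getD []
  (PySem.Str.slice (parts.getD 0 "") (some 2) none,
   if parts.length > 1 then PySem.Str.strip (parts.getD 1 "") else "")

-- nearest 'l.' index ≥ k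
def pvNear (lines : List String) (k : Nat) : Option Nat :=
  (List.range' k (lines.length - k)).find? (pvP lines)

-- the (line, context) pair both programs attach to a '!' line at index i
def pvRes (lines : List String) (i : Nat) : Option String × String :=
  match pvNear lines (i + 1) with
  | some j => if j < i + 15 then (some (pvInfo lines j).1, (pvInfo lines j).2) else (none, "")
  | none => (none, "")

-- the error record emitted at index i (none if not a '!' line)
def pvF (lines : List String) (i : Nat) : Option (List (String × Option String)) :=
  if PySem.Str.startswith (PySem.Str.strip (lines.getD i "")) "!" then
    some [("message", some (PySem.Str.strip (PySem.Str.slice (PySem.Str.strip (lines.getD i "")) (some 1) none))),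
          ("line", (pvRes lines i).1), ("context", some (pvRes lines i).2)]
  else none

theorem pvF_pos (lines : List String) (i : Nat)
    (hb : PySem.Str.startswith (PySem.Str.strip (lines.getD i "")) "!" = true) :
    pvF lines i =
      some [("message", some (PySem.Str.strip (PySem.Str.slice (PySem.Str.strip (lines.getD i "")) (some 1) none))),
            ("line", (pvRes lines i).1), ("context", some (pvRes lines i).2)] := by
  rw [pvF, if_pos hb]

theorem pvF_neg (lines : List String) (i : Nat)
    (hb : ¬ PySem.Str.startswith (PySem.Str.strip (lines.getD i "")) "!" = true) :
    pvF lines i = none := by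
  rw [pvF, if_neg hb]

theorem pvAFind_eq_find? (lines : List String) (js : List Nat) :
    pvAFind lines js = match js.find? (pvP lines) with
      | some j => (some (pvInfo lines j).1, (pvInfo lines j).2)
      | none => (none, "") := by
  induction js with
  | nil => rfl
  | cons j rest ih =>
    rw [List.find?_cons]
    by_cases h : PySem.Str.startswith (PySem.Str.strip (lines.getD j "")) "l." = true
    · have hp : pvP lines j = true := h
      rw [pvAFind, if_pos h, hp]
      simp [pvInfo]
    · have hp : pvP lines j = false := pvBoolFalse h
      rw [pvAFind, if_neg h, hp]
      exact ih

-- a 'l.' prefix and a '!' prefix are mutually exclusive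
theorem pvP_not_bang (s : String) (h : PySem.Str.startswith s "l." = true) :
    PySem.Str.startswith s "!" = false := by
  by_contra hb
  simp only [Bool.not_eq_false] at hb
  rw [PySem.Str.startswith_eq, PySem.Chars.startswith_iff] at h hb
  obtain ⟨t1, h1⟩ := h
  obtain ⟨t2, h2⟩ := hb
  rw [← h2] at h1
  simp [show ("l.".toList) = ['l', '.'] from rfl, show ("!".toList) = ['!'] from rfl] at h1

-- the bounded window scan of A equals the unbounded nearest-'l.' lookup + window check
theorem pvAFind_window (lines : List String) (i : Nat) (hi : i < lines.length) :
    pvAFind lines (List.range' (i + 1) (min (i + 15) lines.length - (i + 1))) =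
      pvRes lines i := by
  have h1 : i + 1 ≤ min (i + 15) lines.length := by omega
  have h2 : min (i + 15) lines.length ≤ lines.length := by omega
  have hmcase : min (i + 15) lines.length = i + 15 ∨ min (i + 15) lines.length = lines.length := by
    omega
  set n := lines.length with hn
  set m := min (i + 15) n with hm
  have hsplit : List.range' (i + 1) (n - (i + 1)) =
      List.range' (i + 1) (m - (i + 1)) ++ List.range' m (n - m) := by
    have := List.range'_append (s := i + 1) (m := m - (i + 1)) (n := n - m) (step := 1)
    rw [show i + 1 + 1 * (m - (i + 1)) = m from by omega] at this
    rw [this, show m - (i + 1) + (n - m) = n - (i + 1) from by omega]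
  rw [pvAFind_eq_find?, pvRes, pvNear, ← hn, hsplit, List.find?_append]
  cases hfa : (List.range' (i + 1) (m - (i + 1))).find? (pvP lines) with
  | some j =>
    have hmem := List.mem_range'_1.mp (List.mem_of_find?_eq_some hfa)
    have hj : j < i + 15 := by omega
    simp only [Option.some_or]
    simp [hj]
  | none =>
    simp only [Option.none_or]
    cases hfb : (List.range' m (n - m)).find? (pvP lines) with
    | some j =>
      have hmem := List.mem_range'_1.mp (List.mem_of_find?_eq_some hfb)
      have hj : ¬ j < i + 15 := by omega
      simp [hj]
    | none => rfl

-- A's main loop appends the filterMap of the per-index emitter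
theorem pvALoop_eq (lines : List String) (is : List Nat)
    (hlt : ∀ i ∈ is, i < lines.length) (errors : List (List (String × Option String))) :
    pvALoop lines is errors = errors ++ is.filterMap (pvF lines) := by
  induction is generalizing errors with
  | nil => simp [pvALoop]
  | cons i rest ih =>
    have hi : i < lines.length := hlt i (by simp)
    have hrest : ∀ j ∈ rest, j < lines.length := fun j hj => hlt j (by simp [hj])
    rw [pvALoop]
    by_cases hb : PySem.Str.startswith (PySem.Str.strip (lines.getD i "")) "!" = true
    · rw [if_pos hb, ih hrest, pvAFind_window lines i hi, List.filterMap_cons,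
        pvF_pos lines i hb]
      simp
    · rw [if_neg hb, ih hrest, List.filterMap_cons, pvF_neg lines i hb]

-- pvNear peels one index off the front of its range
theorem pvNear_succ (lines : List String) (k : Nat) (hk : k < lines.length) :
    pvNear lines k = if pvP lines k then some k else pvNear lines (k + 1) := by
  rw [pvNear, show lines.length - k = 1 + (lines.length - (k + 1)) from by omega,
    ← List.range'_append (s := k) (m := 1) (n := lines.length - (k + 1)) (step := 1)]
  simp only [List.range'_one, Nat.mul_one, List.singleton_append, List.find?_cons]
  cases h : pvP lines k
  · rw [if_neg Bool.false_ne_true]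
    rfl
  · rw [if_pos rfl]

theorem pvNear_len (lines : List String) : pvNear lines lines.length = none := by
  simp [pvNear]

-- the cons unfolding of B's loop (definitional)
theorem pvBLoop_cons (lines : List String) (i : Nat) (rest : List Nat)
    (nextL : Option (Nat × String × String)) (errors : List (List (String × Option String))) :
    pvBLoop lines (i :: rest) nextL errors =
      if PySem.Str.startswith (PySem.Str.strip (lines.getD i "")) "l." then
        pvBLoop lines rest
          (some (i,
            PySem.Str.slice (((PySem.Str.splitMax? (PySem.Str.strip (lines.getD i "")) " " 1).getD []).getD 0 "") (some 2) none,
            if ((PySem.Str.splitMax? (PySem.Str.strip (lines.getD i "")) " " 1).getD []).length > 1 then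
              PySem.Str.strip (((PySem.Str.splitMax? (PySem.Str.strip (lines.getD i "")) " " 1).getD []).getD 1 "")
            else "")) errors
      else if PySem.Str.startswith (PySem.Str.strip (lines.getD i "")) "!" then
        pvBLoop lines rest nextL
          (errors ++ [[("message", some (PySem.Str.strip (PySem.Str.slice (PySem.Str.strip (lines.getD i "")) (some 1) none))),
                       ("line", (match nextL with
                          | some (j, l, c) => if j < i + 15 then (some l, c) else ((none : Option String), "")
                          | none => ((none : Option String), "")).1),
                       ("context", some (match nextL with
                          | some (j, l, c) => if j < i + 15 then (some l, c) else ((none : Option String), "")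
                          | none => ((none : Option String), "")).2)]])
      else pvBLoop lines rest nextL errors := rfl

-- B's main loop, with the carried nextL matching pvNear, emits the same records reversed
theorem pvBLoop_eq (lines : List String) (k : Nat) (hk : k ≤ lines.length)
    (errors : List (List (String × Option String))) :
    pvBLoop lines (List.range k).reverse
        ((pvNear lines k).map (fun j => (j, pvInfo lines j))) errors =
      errors ++ ((List.range k).filterMap (pvF lines)).reverse := by
  induction k generalizing errors with
  | zero => simp [pvBLoop]
  | succ k ih =>
    have hklt : k < lines.length := by omega
    rw [List.range_succ, List.reverse_append, List.reverse_singleton, List.singleton_append,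
      List.filterMap_append, List.reverse_append, pvBLoop_cons]
    by_cases hl : PySem.Str.startswith (PySem.Str.strip (lines.getD k "")) "l." = true
    · -- 'l.' line: it is not a '!' line; nextL is updated to index k
      have hnb : PySem.Str.startswith (PySem.Str.strip (lines.getD k "")) "!" = false :=
        pvP_not_bang _ hl
      have hnear : pvNear lines k = some k := by
        rw [pvNear_succ lines k hklt, if_pos (show pvP lines k = true from hl)]
      rw [if_pos hl,
        show List.filterMap (pvF lines) [k] = [] from by
          rw [List.filterMap_cons, pvF_neg lines k (by rw [hnb]; exact Bool.false_ne_true)]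
          rfl]
      refine Eq.trans ?_ (Eq.trans (ih (by omega) errors) (by simp))
      rw [hnear]
      simp [pvInfo]
    · have hnear : pvNear lines k = pvNear lines (k + 1) := by
        rw [pvNear_succ lines k hklt,
          if_neg (show ¬ pvP lines k = true from hl)]
      by_cases hb : PySem.Str.startswith (PySem.Str.strip (lines.getD k "")) "!" = true
      · -- '!' line: emit using nextL, which encodes pvNear lines (k+1)
        rw [if_neg hl, if_pos hb]
        have hres : (match (pvNear lines (k + 1)).map (fun j => (j, pvInfo lines j)) with
            | some (j, l, c) => if j < k + 15 then (some l, c) else ((none : Option String), "")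
            | none => ((none : Option String), "")) = pvRes lines k := by
          rw [pvRes]
          cases hpn : pvNear lines (k + 1) with
          | none => rfl
          | some j =>
            simp only [Option.map_some]
        simp only [hres]
        rw [← hnear]
        refine Eq.trans (ih (by omega) _) ?_
        rw [List.filterMap_cons, pvF_pos lines k hb]
        simp
      · rw [if_neg hl, if_neg hb, ← hnear]
        refine Eq.trans (ih (by omega) errors) ?_
        rw [List.filterMap_cons, pvF_neg lines k hb]
        simp

-- ===== VERDICT (by name: the statement is the Claim_ definition above) =====
theorem parse_latex_errors_spec : Claim_equal_parse_latex_errors := by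
  intro stdout _
  unfold Spec_parse_latex_errors parse_latex_errors parse_latex_errors_alt
  set lines := (PySem.Str.split? stdout "\n").getD [] with hl
  have hA := pvALoop_eq lines (List.range lines.length)
    (fun i hi => by simpa using List.mem_range.mp hi) []
  have hB := pvBLoop_eq lines lines.length (le_refl _) []
  rw [pvNear_len] at hB
  simp only [Option.map_none] at hB
  simp only [hA, hB, List.nil_append, List.reverse_reverse]
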